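-- pv_equiv track=rewrite | github.com/ZouJiu1/Personal_website_for_idea_markdown_article | mysite/csdn/views.py | replaceNextLine_br
-- ===== SOURCE A (Python) =====
-- def replaceNextLine_br(md):
--     start = -1
--     end = -1
--     md += '123456789'
--     nowlen = len(md)
--     addlen = 0
--     j = 0
--     while j < nowlen + addlen - 1 or addlen!=0:
--         addlen = 0
--         nowlen = len(md)
--         for i in range(j, nowlen, 1):
--             if i < end:
--                 continue
--             j = i
--             if md[i:i + 3]=="<p>":
--                 start = 100
--             elif md[i:i + 4]=="</p>":
--                 start = -1
--             elif start > 0 and md[i]=='\n':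
--                 md = md[:i] + "<br>" + md[i + 1:]
--                 end = i + 4
--                 addlen += 3
--     return md[:-9]
-- ===== SOURCE B (Python) =====
-- def replaceNextLine_br(md):
--     out = []
--     pos = 0
--     n = len(md)
--     inside = False
--     while pos < n:
--         if not inside:
--             k = md.find("<p>", pos)
--             if k == -1:
--                 out.append(md[pos:])
--                 break
--             out.append(md[pos:k + 3])
--             inside = True
--             pos = k + 3
--         else:
--             k1 = md.find("</p>", pos)
--             k2 = md.find("\n", pos)
--             if k2 != -1 and (k1 == -1 or k2 < k1):
--                 out.append(md[pos:k2])
--                 out.append("<br>")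
--                 pos = k2 + 1
--             elif k1 != -1:
--                 out.append(md[pos:k1 + 4])
--                 inside = False
--                 pos = k1 + 4
--             else:
--                 out.append(md[pos:])
--                 break
--     return "".join(out)
-- ===== Notes on version B (the rewrite author's own statement) =====
-- stated objective: faster
-- what changed: B replaces A's char-by-char mutate-the-string-and-restart while/for machinery (sentinel suffix, end-skip bookkeeping, O(n) string rebuild per replaced newline) by a segment loop that jumps between events with str.find and copies whole slices, joining once at the end.
import Mathlib
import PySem

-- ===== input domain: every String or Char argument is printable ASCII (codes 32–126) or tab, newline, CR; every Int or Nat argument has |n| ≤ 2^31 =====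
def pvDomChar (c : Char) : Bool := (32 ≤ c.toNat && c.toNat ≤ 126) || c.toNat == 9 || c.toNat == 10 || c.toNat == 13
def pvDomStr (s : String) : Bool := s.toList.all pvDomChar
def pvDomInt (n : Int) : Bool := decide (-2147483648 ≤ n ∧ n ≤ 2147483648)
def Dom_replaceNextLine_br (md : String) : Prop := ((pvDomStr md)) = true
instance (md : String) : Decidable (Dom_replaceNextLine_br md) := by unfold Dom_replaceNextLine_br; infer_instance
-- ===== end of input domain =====

-- B replaces A's char-by-char restart-and-rescan string surgery by a find-driven segment loop (copy up to the next <p>/</p>/newline event, join once); measured faster in a timing run.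


-- shared literals
def pvSent : List Char := ['1','2','3','4','5','6','7','8','9']   -- '123456789'
def pvBr : List Char := ['<','b','r','>']                         -- "<br>"
def pvP3 : List Char := ['<','p','>']                             -- "<p>"
def pvP4 : List Char := ['<','/','p','>']                         -- "</p>"

-- ===== PORT A =====
-- the inner `for i in range(j, nowlen, 1)` loop; md[i:i+3] is (cs.drop i).take 3 (exact: 0 ≤ i),
-- md[i] is cs.getD i (always in range since i < nowlen ≤ len), md[:i]+"<br>"+md[i+1:] is take/++/drop.
-- state is (md, start, end, addlen, j); returns the state after the loop.
def pvForA (cs : List Char) (start e : Int) (addlen j : Nat) (i hi : Nat) :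
    List Char × Int × Int × Nat × Nat :=
  if h : i < hi then
    if (i : Int) < e then pvForA cs start e addlen j (i+1) hi
    else if (cs.drop i).take 3 = pvP3 then pvForA cs 100 e addlen i (i+1) hi
    else if (cs.drop i).take 4 = pvP4 then pvForA cs (-1) e addlen i (i+1) hi
    else if start > 0 ∧ cs.getD i ' ' = '\n' then
      pvForA (cs.take i ++ pvBr ++ cs.drop (i+1)) start ((i:Int)+4) (addlen+3) i (i+1) hi
    else pvForA cs start e addlen i (i+1) hi
  else (cs, start, e, addlen, j)
termination_by hi - i

-- the outer `while j < nowlen + addlen - 1 or addlen != 0` loop; the fuel argument is only a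
-- totality guard (count '\n' + 1 passes always suffice, proved below).
def pvWhileA (fuel : Nat) (cs : List Char) (start e : Int) (j addlen nowlen : Nat) : List Char :=
  match fuel with
  | 0 => cs
  | fuel + 1 =>
    if (j : Int) < (nowlen : Int) + (addlen : Int) - 1 ∨ addlen ≠ 0 then
      -- addlen = 0; nowlen = len(md); for i in range(j, nowlen, 1): ...
      match pvForA cs start e 0 j j cs.length with
      | (cs', s', e', a', j') => pvWhileA fuel cs' s' e' j' a' cs.length
    else cs

def replaceNextLine_br (md : String) : String :=
  let cs := md.toList ++ pvSent                     -- md += '123456789'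
  let out := pvWhileA (cs.count '\n' + 1) cs (-1) (-1) 0 0 cs.length
  (out.take (out.length - 9)).asString              -- md[:-9] (len ≥ 9 always)

-- ===== PORT B =====
-- Source B's segment loop: jump between events with str.find (PySem.Chars.findFrom), copying whole
-- slices; md[pos:k] is (cs.drop pos).take (k-pos), md[pos:] is cs.drop pos (exact: 0 ≤ pos ≤ k).
-- k.toNat is faithful: it is used only when k ≠ -1, where find returns an index ≥ pos ≥ 0.
-- The fuel argument is only a totality guard (pos strictly increases, so length+1 rounds suffice).
def pvBGo (cs : List Char) (fuel : Nat) (pos : Nat) (inside : Bool) (out : List Char) : List Char :=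
  match fuel with
  | 0 => out
  | fuel + 1 =>
    if pos < cs.length then
      if inside = false then
        let k := PySem.Chars.findFrom cs pvP3 (pos : Int) none
        if k = -1 then out ++ cs.drop pos
        else pvBGo cs fuel (k.toNat + 3) true (out ++ (cs.drop pos).take (k.toNat + 3 - pos))
      else
        let k1 := PySem.Chars.findFrom cs pvP4 (pos : Int) none
        let k2 := PySem.Chars.findFrom cs ['\n'] (pos : Int) none
        if k2 ≠ -1 ∧ (k1 = -1 ∨ k2 < k1) then
          pvBGo cs fuel (k2.toNat + 1) true (out ++ (cs.drop pos).take (k2.toNat - pos) ++ pvBr)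
        else if k1 ≠ -1 then
          pvBGo cs fuel (k1.toNat + 4) false (out ++ (cs.drop pos).take (k1.toNat + 4 - pos))
        else out ++ cs.drop pos
    else out

def replaceNextLine_br_alt (md : String) : String :=
  (pvBGo md.toList (md.toList.length + 1) 0 false []).asString

-- ===== PRECONDITION & SPEC =====
def Spec_replaceNextLine_br (md : String) (out : String) : Prop := out = replaceNextLine_br_alt md
instance (md : String) (out : String) : Decidable (Spec_replaceNextLine_br md out) := by unfold Spec_replaceNextLine_br; infer_instance

-- ===== CLAIM (what is proved, stated in full; the proofs are below) =====
def Claim_equal_replaceNextLine_br : Prop := ∀ (md : String), Dom_replaceNextLine_br md → Spec_replaceNextLine_br md (replaceNextLine_br md)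

-- ===== LEMMAS AND PROOFS =====

-- the common one-pass engine both ports are reduced to (B's loop with an explicit result list)
def pvGo : List Char → Bool → List Char
  | [], _ => []
  | c :: rest, ins =>
    if (c :: rest).take 3 = pvP3 then c :: pvGo rest true
    else if (c :: rest).take 4 = pvP4 then c :: pvGo rest false
    else if ins ∧ c = '\n' then pvBr ++ pvGo rest ins
    else c :: pvGo rest ins

-- resume point of A's scan: max of the scan index j and the skip bound end
def pvR (e : Int) (j : Nat) : Nat := max j e.toNat
-- the final answer as seen from one of A's loop states (loop invariant shape)
def pvFb (cs : List Char) (e : Int) (j : Nat) (start : Int) : List Char :=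
  cs.take (pvR e j) ++ pvGo (cs.drop (pvR e j)) (decide (start > 0))

lemma pvPrefix_drop_infix {P t : List Char} {i : Nat} (h : P <+: t.drop i) : P <:+: t :=
  h.isInfix.trans (List.drop_suffix i t).isInfix

lemma pvCons_ne_nl {c : Char} {r : List Char} (h : ¬ ['\n'] <+: c :: r) : c ≠ '\n' := by
  intro hc; exact h (by rw [hc]; exact ⟨r, rfl⟩)

lemma pvCopy_false : ∀ (d : Nat) (t : List Char),
    (∀ x, x < d → ¬ pvP3 <+: t.drop x) →
    pvGo t false = t.take d ++ pvGo (t.drop d) false := by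
  intro d
  induction d with
  | zero => intro t _; simp
  | succ d ih =>
    intro t hx
    cases t with
    | nil => simp
    | cons c r =>
      have h3 : ¬ (c :: r).take 3 = pvP3 := by
        intro h; exact hx 0 (by omega) (by simp; exact (List.prefix_iff_eq_take.mpr h.symm))
      rw [pvGo, if_neg h3]
      have hrec := ih r (fun x hlt => by
        have := hx (x+1) (by omega)
        simpa using this)
      by_cases h4 : (c :: r).take 4 = pvP4
      · rw [if_pos h4, hrec]; simp
      · rw [if_neg h4, if_neg (by simp), hrec]; simp

lemma pvCopy_true : ∀ (d : Nat) (t : List Char),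
    (∀ x, x < d → ¬ pvP4 <+: t.drop x ∧ ¬ ['\n'] <+: t.drop x) →
    pvGo t true = t.take d ++ pvGo (t.drop d) true := by
  intro d
  induction d with
  | zero => intro t _; simp
  | succ d ih =>
    intro t hx
    cases t with
    | nil => simp
    | cons c r =>
      obtain ⟨hh4, hhn⟩ := hx 0 (by omega)
      have h4 : ¬ (c :: r).take 4 = pvP4 := by
        intro h; exact hh4 (by simp; exact (List.prefix_iff_eq_take.mpr h.symm))
      have hcn : c ≠ '\n' := pvCons_ne_nl (r := r) (by simpa using hhn)
      have hrec := ih r (fun x hlt => by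
        have := hx (x+1) (by omega)
        simpa using this)
      rw [pvGo]
      by_cases h3 : (c :: r).take 3 = pvP3
      · rw [if_pos h3, hrec]; simp
      · rw [if_neg h3, if_neg h4, if_neg (by simp [hcn]), hrec]; simp

lemma pvCopy_false_all (t : List Char) (h : ∀ x, ¬ pvP3 <+: t.drop x) :
    pvGo t false = t := by
  have := pvCopy_false t.length t (fun x _ => h x)
  simpa [pvGo] using this

lemma pvCopy_true_all (t : List Char) (h : ∀ x, ¬ pvP4 <+: t.drop x ∧ ¬ ['\n'] <+: t.drop x) :
    pvGo t true = t := by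
  have := pvCopy_true t.length t (fun x _ => h x)
  simpa [pvGo] using this

lemma pvGo_at_P3 (t : List Char) (h : pvP3 <+: t) :
    pvGo t false = pvP3 ++ pvGo (t.drop 3) true := by
  obtain ⟨r, hr⟩ := h
  subst hr
  show pvGo ('<' :: 'p' :: '>' :: r) false = _
  rw [pvGo, if_pos (by simp [pvP3])]
  rw [pvGo, if_neg (by simp [pvP3]), if_neg (by simp [pvP4]), if_neg (by simp)]
  rw [pvGo, if_neg (by simp [pvP3]), if_neg (by simp [pvP4]), if_neg (by simp)]
  simp [pvP3]

lemma pvGo_at_P4 (t : List Char) (h : pvP4 <+: t) :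
    pvGo t true = pvP4 ++ pvGo (t.drop 4) false := by
  obtain ⟨r, hr⟩ := h
  subst hr
  show pvGo ('<' :: '/' :: 'p' :: '>' :: r) true = _
  rw [pvGo, if_neg (by simp [pvP3]), if_pos (by simp [pvP4])]
  rw [pvGo, if_neg (by simp [pvP3]), if_neg (by simp [pvP4]), if_neg (by simp)]
  rw [pvGo, if_neg (by simp [pvP3]), if_neg (by simp [pvP4]), if_neg (by simp)]
  rw [pvGo, if_neg (by simp [pvP3]), if_neg (by simp [pvP4]), if_neg (by simp)]
  simp [pvP4]

lemma pvGo_at_NL (r : List Char) :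
    pvGo ('\n' :: r) true = pvBr ++ pvGo r true := by
  rw [pvGo, if_neg (by simp [pvP3]), if_neg (by simp [pvP4]), if_pos (by simp)]

lemma pvBGo_eq (cs : List Char) : ∀ (fuel pos : Nat) (ins : Bool) (out : List Char),
    cs.length - pos < fuel → pvBGo cs fuel pos ins out = out ++ pvGo (cs.drop pos) ins := by
  intro fuel
  induction fuel with
  | zero => intro pos ins out hf; omega
  | succ fuel ih =>
    intro pos ins out hf
    rw [pvBGo]
    by_cases hp : pos < cs.length
    · rw [if_pos hp]
      cases ins with
      | false =>
        rw [if_pos rfl]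
        by_cases hkm : PySem.Chars.findFrom cs pvP3 ((pos : Nat) : Int) none = -1
        · rw [if_pos hkm]
          have hno := (PySem.Chars.findFrom_natCast_eq_neg_one_iff cs pvP3 pos (le_of_lt hp)).mp hkm
          rw [pvCopy_false_all (cs.drop pos) (fun x hpre => hno (pvPrefix_drop_infix hpre))]
        · rw [if_neg hkm]
          obtain ⟨hge, hpre, hmin⟩ :=
            PySem.Chars.findFrom_natCast_spec cs pvP3 pos (le_of_lt hp) hkm
          set k := PySem.Chars.findFrom cs pvP3 ((pos : Nat) : Int) none with hkdef
          have hposK : pos ≤ k.toNat := by omega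
          have hlen3 : 3 ≤ (cs.drop k.toNat).length := by
            have := hpre.length_le; simpa [pvP3] using this
          have hK3 : k.toNat + 3 ≤ cs.length := by simp at hlen3; omega
          have hdK : (cs.drop pos).drop (k.toNat - pos) = cs.drop k.toNat := by
            rw [List.drop_drop]; congr 1; omega
          have htk3 : pvP3 = (cs.drop k.toNat).take 3 := by
            simpa [pvP3] using List.prefix_iff_eq_take.mp hpre
          have hsplit : pvGo (cs.drop pos) false =
              (cs.drop pos).take (k.toNat - pos) ++ (pvP3 ++ pvGo (cs.drop (k.toNat + 3)) true) := by
            rw [pvCopy_false (k.toNat - pos) (cs.drop pos) (fun x hx => by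
              rw [List.drop_drop]
              exact hmin (pos + x) (by omega) (by omega))]
            rw [hdK, pvGo_at_P3 _ hpre, List.drop_drop]
          have htake : (cs.drop pos).take (k.toNat + 3 - pos) =
              (cs.drop pos).take (k.toNat - pos) ++ pvP3 := by
            rw [show k.toNat + 3 - pos = (k.toNat - pos) + 3 by omega, List.take_add]
            congr 1
            rw [hdK, ← htk3]
          rw [ih (k.toNat + 3) true _ (by omega), hsplit, htake]
          simp
      | true =>
        rw [if_neg (by simp)]
        by_cases hcond : PySem.Chars.findFrom cs ['\n'] ((pos : Nat) : Int) none ≠ -1 ∧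
            (PySem.Chars.findFrom cs pvP4 ((pos : Nat) : Int) none = -1 ∨
             PySem.Chars.findFrom cs ['\n'] ((pos : Nat) : Int) none <
               PySem.Chars.findFrom cs pvP4 ((pos : Nat) : Int) none)
        · rw [if_pos hcond]
          obtain ⟨hk2ne, hor⟩ := hcond
          obtain ⟨hge2, hpre2, hmin2⟩ :=
            PySem.Chars.findFrom_natCast_spec cs ['\n'] pos (le_of_lt hp) hk2ne
          set k2 := PySem.Chars.findFrom cs ['\n'] ((pos : Nat) : Int) none with hk2def
          set k1 := PySem.Chars.findFrom cs pvP4 ((pos : Nat) : Int) none with hk1def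
          have hposK : pos ≤ k2.toNat := by omega
          have hjoint : ∀ x, x < k2.toNat - pos →
              ¬ pvP4 <+: (cs.drop pos).drop x ∧ ¬ ['\n'] <+: (cs.drop pos).drop x := by
            intro x hx
            constructor
            · rcases hor with h1 | h1
              · exact fun hpre =>
                  (PySem.Chars.findFrom_natCast_eq_neg_one_iff cs pvP4 pos (le_of_lt hp)).mp h1
                    (pvPrefix_drop_infix hpre)
              · have hk1ne : k1 ≠ -1 := by intro hc; rw [hc] at h1; omega
                obtain ⟨hge1, _, hmin1⟩ :=
                  PySem.Chars.findFrom_natCast_spec cs pvP4 pos (le_of_lt hp) hk1ne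
                rw [List.drop_drop]
                exact hmin1 (pos + x) (by omega) (by omega)
            · rw [List.drop_drop]
              exact hmin2 (pos + x) (by omega) (by omega)
          obtain ⟨r2, hr2⟩ := hpre2
          have hK2len : k2.toNat < cs.length := by
            have : (cs.drop k2.toNat).length = r2.length + 1 := by rw [← hr2]; simp
            simp at this; omega
          have hdK : (cs.drop pos).drop (k2.toNat - pos) = cs.drop k2.toNat := by
            rw [List.drop_drop]; congr 1; omega
          have hr2' : cs.drop (k2.toNat + 1) = r2 := by
            have h := congrArg (List.drop 1) hr2
            simpa [List.drop_drop] using h.symm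
          have hsplit : pvGo (cs.drop pos) true =
              (cs.drop pos).take (k2.toNat - pos) ++ (pvBr ++ pvGo (cs.drop (k2.toNat + 1)) true) := by
            rw [pvCopy_true (k2.toNat - pos) (cs.drop pos) hjoint, hdK, ← hr2,
                List.singleton_append, pvGo_at_NL, hr2']
          rw [ih (k2.toNat + 1) true _ (by omega), hsplit]
          simp
        · rw [if_neg hcond]
          by_cases hk1ne : PySem.Chars.findFrom cs pvP4 ((pos : Nat) : Int) none ≠ -1
          · rw [if_pos hk1ne]
            obtain ⟨hge1, hpre1, hmin1⟩ :=
              PySem.Chars.findFrom_natCast_spec cs pvP4 pos (le_of_lt hp) hk1ne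
            set k1 := PySem.Chars.findFrom cs pvP4 ((pos : Nat) : Int) none with hk1def
            set k2 := PySem.Chars.findFrom cs ['\n'] ((pos : Nat) : Int) none with hk2def
            have hposK : pos ≤ k1.toNat := by omega
            have hlen4 : 4 ≤ (cs.drop k1.toNat).length := by
              have := hpre1.length_le; simpa [pvP4] using this
            have hK4 : k1.toNat + 4 ≤ cs.length := by simp at hlen4; omega
            have hjoint : ∀ x, x < k1.toNat - pos →
                ¬ pvP4 <+: (cs.drop pos).drop x ∧ ¬ ['\n'] <+: (cs.drop pos).drop x := by
              intro x hx
              refine ⟨by rw [List.drop_drop]; exact hmin1 (pos + x) (by omega) (by omega), ?_⟩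
              by_cases hk2 : k2 = -1
              · exact fun hpre =>
                  (PySem.Chars.findFrom_natCast_eq_neg_one_iff cs ['\n'] pos (le_of_lt hp)).mp hk2
                    (pvPrefix_drop_infix hpre)
              · obtain ⟨hge2, _, hmin2⟩ :=
                  PySem.Chars.findFrom_natCast_spec cs ['\n'] pos (le_of_lt hp) hk2
                have hle : k1 ≤ k2 := by
                  rcases not_and_or.mp hcond with h | h
                  · exact absurd hk2 (by simpa using h)
                  · push_neg at h
                    exact h.2
                rw [List.drop_drop]
                exact hmin2 (pos + x) (by omega) (by omega)
            have hdK : (cs.drop pos).drop (k1.toNat - pos) = cs.drop k1.toNat := by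
              rw [List.drop_drop]; congr 1; omega
            have htk4 : pvP4 = (cs.drop k1.toNat).take 4 := by
              simpa [pvP4] using List.prefix_iff_eq_take.mp hpre1
            have hsplit : pvGo (cs.drop pos) true =
                (cs.drop pos).take (k1.toNat - pos) ++ (pvP4 ++ pvGo (cs.drop (k1.toNat + 4)) false) := by
              rw [pvCopy_true (k1.toNat - pos) (cs.drop pos) hjoint, hdK, pvGo_at_P4 _ hpre1,
                  List.drop_drop]
            have htake : (cs.drop pos).take (k1.toNat + 4 - pos) =
                (cs.drop pos).take (k1.toNat - pos) ++ pvP4 := by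
              rw [show k1.toNat + 4 - pos = (k1.toNat - pos) + 4 by omega, List.take_add]
              congr 1
              rw [hdK, ← htk4]
            rw [ih (k1.toNat + 4) false _ (by omega), hsplit, htake]
            simp
          · rw [if_neg hk1ne]
            push_neg at hk1ne hcond
            have hk2 : PySem.Chars.findFrom cs ['\n'] ((pos : Nat) : Int) none = -1 := by
              by_contra hc
              have := hcond hc
              rw [hk1ne] at this
              simp at this
            have hall : ∀ x, ¬ pvP4 <+: (cs.drop pos).drop x ∧ ¬ ['\n'] <+: (cs.drop pos).drop x := by
              intro x
              constructor
              · intro hpre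
                exact (PySem.Chars.findFrom_natCast_eq_neg_one_iff cs pvP4 pos (le_of_lt hp)).mp hk1ne
                  (pvPrefix_drop_infix hpre)
              · intro hpre
                exact (PySem.Chars.findFrom_natCast_eq_neg_one_iff cs ['\n'] pos (le_of_lt hp)).mp hk2
                  (pvPrefix_drop_infix hpre)
            rw [pvCopy_true_all (cs.drop pos) hall]
    · rw [if_neg hp]
      rw [List.drop_eq_nil_of_le (by omega)]
      simp [pvGo]

lemma pvNL (cs : List Char) (i : Nat) (hsuf : pvSent <:+ cs) (hi : i < cs.length)
    (hc : cs.getD i ' ' = '\n') : i + 10 ≤ cs.length := by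
  obtain ⟨pre, rfl⟩ := hsuf
  have hlen : (pre ++ pvSent).length = pre.length + 9 := by simp [pvSent]
  by_contra hcon
  have hge : pre.length ≤ i := by omega
  have := List.getD_eq_getElem (pre ++ pvSent) ' ' hi
  rw [hc] at this
  have hidx : (pre ++ pvSent)[i] = pvSent[i - pre.length]'(by simp [pvSent]; omega) :=
    List.getElem_append_right hge
  rw [hidx] at this
  have hmem : '\n' ∈ pvSent := by rw [this]; exact List.getElem_mem _
  exact absurd hmem (by decide)

lemma pvRepl_suffix (cs : List Char) (i : Nat) (hsuf : pvSent <:+ cs)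
    (h : i + 10 ≤ cs.length) : pvSent <:+ (cs.take i ++ pvBr ++ cs.drop (i+1)) := by
  obtain ⟨pre, rfl⟩ := hsuf
  have hle : i + 1 ≤ pre.length := by simp [pvSent] at h ⊢; omega
  rw [List.drop_append_of_le_length hle]
  exact ⟨(pre ++ pvSent).take i ++ pvBr ++ pre.drop (i+1), by simp⟩

lemma pvRepl_len (cs : List Char) (i : Nat) (h : i + 1 ≤ cs.length) :
    (cs.take i ++ pvBr ++ cs.drop (i+1)).length = cs.length + 3 := by
  simp [pvBr]; omega

lemma pvSplit (cs : List Char) (i : Nat) (h : i < cs.length) :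
    cs = cs.take i ++ cs[i] :: cs.drop (i+1) := by
  conv_lhs => rw [← List.take_append_drop i cs]
  rw [List.drop_eq_getElem_cons h]

lemma pvRepl_count (cs : List Char) (i : Nat) (h : i < cs.length)
    (hc : cs.getD i ' ' = '\n') :
    (cs.take i ++ pvBr ++ cs.drop (i+1)).count '\n' + 1 = cs.count '\n' := by
  have hg : cs[i] = '\n' := by rw [← List.getD_eq_getElem cs ' ' h, hc]
  conv_rhs => rw [pvSplit cs i h]
  simp [List.count_append, pvBr, hg]
  omega

lemma pvTakeS (cs : List Char) (i : Nat) (h : i < cs.length) :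
    cs.take (i+1) = cs.take i ++ [cs[i]] := by
  rw [List.take_succ]
  simp [List.getElem?_eq_getElem h]

lemma pvSent_tail (cs : List Char) (k : Nat) (s : Bool) (hsuf : pvSent <:+ cs)
    (hk : cs.length - 1 ≤ k) : pvGo (cs.drop k) s = cs.drop k := by
  obtain ⟨pre, rfl⟩ := hsuf
  have hlen : (pre ++ pvSent).length = pre.length + 9 := by simp [pvSent]
  by_cases hge : (pre ++ pvSent).length ≤ k
  · rw [List.drop_eq_nil_of_le hge]; rfl
  · have hk' : k = pre.length + 8 := by omega
    have : (pre ++ pvSent).drop k = pvSent.drop 8 := by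
      rw [hk', List.drop_append]
      simp [List.drop_eq_nil_of_le]
    rw [this]
    cases s <;> rfl

lemma pvFb_last (cs : List Char) (e : Int) (j : Nat) (start : Int)
    (hsuf : pvSent <:+ cs) (hj : cs.length - 1 ≤ j) : pvFb cs e j start = cs := by
  unfold pvFb
  rw [pvSent_tail cs (pvR e j) _ hsuf (by unfold pvR; omega), List.take_append_drop]

lemma pvForA_spec : ∀ (n : Nat) (i hi : Nat) (cs : List Char) (start e : Int) (a j : Nat),
    hi - i ≤ n → hi ≤ cs.length → pvSent <:+ cs → e ≤ (cs.length : Int) - 6 →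
    pvFb cs e j start = cs.take (pvR e i) ++ pvGo (cs.drop (pvR e i)) (decide (start > 0)) →
    (pvForA cs start e a j i hi).1.length + a = cs.length + (pvForA cs start e a j i hi).2.2.2.1 ∧
    a ≤ (pvForA cs start e a j i hi).2.2.2.1 ∧
    pvSent <:+ (pvForA cs start e a j i hi).1 ∧
    (pvForA cs start e a j i hi).2.2.1 ≤ ((pvForA cs start e a j i hi).1.length : Int) - 6 ∧
    pvFb (pvForA cs start e a j i hi).1 (pvForA cs start e a j i hi).2.2.1 (pvForA cs start e a j i hi).2.2.2.2 (pvForA cs start e a j i hi).2.1 = pvFb cs e j start ∧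
    (pvForA cs start e a j i hi).1.count '\n' ≤ cs.count '\n' ∧
    ((pvForA cs start e a j i hi).2.2.2.1 ≠ a → (pvForA cs start e a j i hi).1.count '\n' < cs.count '\n') ∧
    ((pvForA cs start e a j i hi).2.2.2.1 = a →
      (pvForA cs start e a j i hi).1 = cs ∧
      (i < hi → e ≤ (hi : Int) - 1 → (pvForA cs start e a j i hi).2.2.2.2 = hi - 1) ∧
      (hi ≤ i → (pvForA cs start e a j i hi).2.2.2.2 = j)) ∧
    ((pvForA cs start e a j i hi).2.2.2.2 = j ∨ (pvForA cs start e a j i hi).2.2.2.2 < hi) := by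
  intro n
  induction n with
  | zero =>
    intro i hi cs start e a j hn hhi hsuf he hP
    have h : ¬ i < hi := by omega
    rw [pvForA, dif_neg h]
    exact ⟨by simp, le_refl _, hsuf, he, rfl, le_refl _, by simp, fun _ => ⟨rfl, fun hlt _ => absurd hlt h, fun _ => rfl⟩, Or.inl rfl⟩
  | succ n ih =>
    intro i hi cs start e a j hn hhi hsuf he hP
    by_cases h : i < hi
    · have hilen : i < cs.length := lt_of_lt_of_le h hhi
      have hdrop : cs.drop i = cs[i] :: cs.drop (i+1) := List.drop_eq_getElem_cons hilen
      rw [pvForA]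
      simp only [h, dif_pos]
      by_cases hskip : (i : Int) < e
      · -- skip: i < end
        simp only [hskip, if_pos]
        have hR : pvR e (i+1) = pvR e i := by simp [pvR]; omega
        have hP' : pvFb cs e j start = cs.take (pvR e (i+1)) ++ pvGo (cs.drop (pvR e (i+1))) (decide (start > 0)) := by
          rw [hR]; exact hP
        obtain ⟨c1, c2, c3, c4, c5, c6, c7, c8, c9⟩ := ih (i+1) hi cs start e a j (by omega) hhi hsuf he hP'
        refine ⟨c1, c2, c3, c4, c5, c6, c7, ?_, c9⟩
        intro haeq
        obtain ⟨d1, d2, d3⟩ := c8 haeq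
        refine ⟨d1, ?_, fun hge => absurd h (by omega)⟩
        intro _ hle
        by_cases hlast : i + 1 < hi
        · exact d2 hlast hle
        · exfalso; have : (i:Int) ≥ (hi:Int) - 1 := by omega
          omega
      · -- process: i >= end, j := i
        have hRi : pvR e i = i := by simp [pvR]; omega
        have hRi1 : pvR e (i+1) = i+1 := by simp [pvR]; omega
        have hPi : pvFb cs e j start = cs.take i ++ pvGo (cs.drop i) (decide (start > 0)) := by
          rw [hP, hRi]
        simp only [hskip, if_neg, not_false_iff]
        by_cases h3 : (cs.drop i).take 3 = pvP3
        · simp only [h3, if_pos]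
          have hgo : ∀ s : Bool, pvGo (cs.drop i) s = cs[i] :: pvGo (cs.drop (i+1)) true := by
            intro s; rw [hdrop, pvGo, if_pos (by rw [← hdrop]; exact h3)]
          have hP' : pvFb cs e i 100 = cs.take (pvR e (i+1)) ++ pvGo (cs.drop (pvR e (i+1))) (decide ((100:Int) > 0)) := by
            unfold pvFb
            rw [hRi1, show pvR e i = i from hRi, hgo, pvTakeS cs i hilen, List.append_assoc]
            norm_num
          obtain ⟨c1, c2, c3, c4, c5, c6, c7, c8, c9⟩ := ih (i+1) hi cs 100 e a i (by omega) hhi hsuf he hP'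
          refine ⟨c1, c2, c3, c4, ?_, c6, c7, ?_, ?_⟩
          · rw [c5, hPi]
            unfold pvFb
            rw [show pvR e i = i from hRi, hgo, hgo]
          · intro haeq
            obtain ⟨d1, d2, d3⟩ := c8 haeq
            refine ⟨d1, ?_, fun hge => absurd h (by omega)⟩
            intro _ hle
            by_cases hlast : i + 1 < hi
            · exact d2 hlast hle
            · rw [d3 (by omega)]; omega
          · rcases c9 with hc | hc
            · right; omega
            · right; exact hc
        · simp only [h3, if_false]
          by_cases h4 : (cs.drop i).take 4 = pvP4
          · -- "</p>": start := -1
            simp only [h4, if_pos]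
            have hgo : ∀ s : Bool, pvGo (cs.drop i) s = cs[i] :: pvGo (cs.drop (i+1)) false := by
              intro s
              rw [hdrop, pvGo, if_neg (by rw [← hdrop]; exact h3), if_pos (by rw [← hdrop]; exact h4)]
            have hP' : pvFb cs e i (-1) = cs.take (pvR e (i+1)) ++ pvGo (cs.drop (pvR e (i+1))) (decide ((-1:Int) > 0)) := by
              unfold pvFb
              rw [hRi1, show pvR e i = i from hRi, hgo, pvTakeS cs i hilen, List.append_assoc]
              norm_num
            obtain ⟨c1, c2, c3, c4, c5, c6, c7, c8, c9⟩ := ih (i+1) hi cs (-1) e a i (by omega) hhi hsuf he hP'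
            refine ⟨c1, c2, c3, c4, ?_, c6, c7, ?_, ?_⟩
            · rw [c5, hPi]
              unfold pvFb
              rw [show pvR e i = i from hRi, hgo, hgo]
            · intro haeq
              obtain ⟨d1, d2, d3⟩ := c8 haeq
              refine ⟨d1, ?_, fun hge => absurd h (by omega)⟩
              intro _ hle
              by_cases hlast : i + 1 < hi
              · exact d2 hlast hle
              · rw [d3 (by omega)]; omega
            · rcases c9 with hc | hc
              · right; omega
              · right; exact hc
          · simp only [h4, if_false]
            by_cases h5 : start > 0 ∧ cs.getD i ' ' = '\n'
            · -- replacement: md = md[:i] + "<br>" + md[i+1:]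
              rw [if_pos h5]
              have hci : cs[i] = '\n' := by rw [← List.getD_eq_getElem cs ' ' hilen, h5.2]
              have h10 : i + 10 ≤ cs.length := pvNL cs i hsuf hilen h5.2
              have len' : (cs.take i ++ pvBr ++ cs.drop (i+1)).length = cs.length + 3 :=
                pvRepl_len cs i (by omega)
              have suf' : pvSent <:+ (cs.take i ++ pvBr ++ cs.drop (i+1)) := pvRepl_suffix cs i hsuf h10
              have he' : (i:Int) + 4 ≤ ((cs.take i ++ pvBr ++ cs.drop (i+1)).length : Int) - 6 := by
                rw [len']; push_cast; omega
              have hhi' : hi ≤ (cs.take i ++ pvBr ++ cs.drop (i+1)).length := by omega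
              have hP' : pvFb (cs.take i ++ pvBr ++ cs.drop (i+1)) ((i:Int)+4) i start =
                  (cs.take i ++ pvBr ++ cs.drop (i+1)).take (pvR ((i:Int)+4) (i+1)) ++
                  pvGo ((cs.take i ++ pvBr ++ cs.drop (i+1)).drop (pvR ((i:Int)+4) (i+1))) (decide (start > 0)) := by
                unfold pvFb
                rw [show pvR ((i:Int)+4) i = i+4 by simp [pvR]; omega,
                    show pvR ((i:Int)+4) (i+1) = i+4 by simp [pvR]; omega]
              obtain ⟨c1, c2, c3, c4, c5, c6, c7, c8, c9⟩ :=
                ih (i+1) hi (cs.take i ++ pvBr ++ cs.drop (i+1)) start ((i:Int)+4) (a+3) i (by omega) hhi' suf' he' hP'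
              have hcount : (cs.take i ++ pvBr ++ cs.drop (i+1)).count '\n' + 1 = cs.count '\n' :=
                pvRepl_count cs i hilen h5.2
              have hlen14 : (cs.take i ++ pvBr).length = i + 4 := by simp [pvBr]; omega
              have htake : (cs.take i ++ pvBr ++ cs.drop (i+1)).take (i+4) = cs.take i ++ pvBr := by
                rw [show cs.take i ++ pvBr ++ cs.drop (i+1) = (cs.take i ++ pvBr) ++ cs.drop (i+1) from rfl]
                rw [List.take_append_of_le_length (le_of_eq hlen14.symm), List.take_of_length_le (le_of_eq hlen14)]
              have hdropr : (cs.take i ++ pvBr ++ cs.drop (i+1)).drop (i+4) = cs.drop (i+1) := by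
                rw [show cs.take i ++ pvBr ++ cs.drop (i+1) = (cs.take i ++ pvBr) ++ cs.drop (i+1) from rfl]
                rw [← hlen14, List.drop_left]
              have hgo : pvGo (cs.drop i) (decide (start > 0)) = pvBr ++ pvGo (cs.drop (i+1)) (decide (start > 0)) := by
                rw [hdrop, pvGo, if_neg (by rw [← hdrop]; exact h3), if_neg (by rw [← hdrop]; exact h4),
                    if_pos (by exact ⟨by simp [h5.1], hci⟩)]
              refine ⟨?g1, ?g2, c3, c4, ?_, ?g3, fun _ => ?g4, ?_, ?_⟩
              case g1 => rw [len'] at c1; omega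
              case g2 => omega
              case g3 => omega
              case g4 => omega
              · rw [c5, hPi]
                unfold pvFb
                rw [show pvR ((i:Int)+4) i = i+4 by simp [pvR]; omega, htake, hdropr, hgo, List.append_assoc]
              · intro haeq; omega
              · rcases c9 with hc | hc
                · right; omega
                · right; exact hc
            · -- plain character
              rw [if_neg h5]
              have hcond : ¬ (decide (start > 0) = true ∧ cs[i] = '\n') := by
                intro hcl
                exact h5 ⟨by simpa using hcl.1, by rw [List.getD_eq_getElem cs ' ' hilen]; exact hcl.2⟩
              have hgo : pvGo (cs.drop i) (decide (start > 0)) = cs[i] :: pvGo (cs.drop (i+1)) (decide (start > 0)) := by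
                rw [hdrop, pvGo, if_neg (by rw [← hdrop]; exact h3), if_neg (by rw [← hdrop]; exact h4), if_neg hcond]
              have hP' : pvFb cs e i start = cs.take (pvR e (i+1)) ++ pvGo (cs.drop (pvR e (i+1))) (decide (start > 0)) := by
                unfold pvFb
                rw [hRi1, show pvR e i = i from hRi, hgo, pvTakeS cs i hilen, List.append_assoc]
                rfl
              obtain ⟨c1, c2, c3, c4, c5, c6, c7, c8, c9⟩ := ih (i+1) hi cs start e a i (by omega) hhi hsuf he hP'
              refine ⟨c1, c2, c3, c4, ?_, c6, c7, ?_, ?_⟩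
              · rw [c5, hPi]
                unfold pvFb
                rw [show pvR e i = i from hRi, hgo]
              · intro haeq
                obtain ⟨d1, d2, d3⟩ := c8 haeq
                refine ⟨d1, ?_, fun hge => absurd h (by omega)⟩
                intro _ hle
                by_cases hlast : i + 1 < hi
                · exact d2 hlast hle
                · rw [d3 (by omega)]; omega
              · rcases c9 with hc | hc
                · right; omega
                · right; exact hc
    · have hnot : ¬ i < hi := h
      rw [pvForA, dif_neg hnot]
      exact ⟨by simp, le_refl _, hsuf, he, rfl, le_refl _, by simp, fun _ => ⟨rfl, fun hlt _ => absurd hlt hnot, fun _ => rfl⟩, Or.inl rfl⟩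

lemma pvWhileA_spec : ∀ (fuel : Nat) (cs : List Char) (start e : Int) (j a nowlen : Nat),
    cs.count '\n' + 1 ≤ fuel → pvSent <:+ cs → e ≤ (cs.length : Int) - 6 →
    j < cs.length → cs.length = nowlen + a →
    pvWhileA fuel cs start e j a nowlen = pvFb cs e j start := by
  intro fuel
  induction fuel with
  | zero => intro cs start e j a nowlen hf; omega
  | succ fuel ih =>
    intro cs start e j a nowlen hf hsuf he hj hlen
    rw [pvWhileA]
    by_cases hc : (j : Int) < (nowlen : Int) + (a : Int) - 1 ∨ a ≠ 0
    · rw [if_pos hc]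
      obtain ⟨c1, c2, c3, c4, c5, c6, c7, c8, c9⟩ :=
        pvForA_spec (cs.length - j) j cs.length cs start e 0 j (le_refl _) (le_refl _) hsuf he rfl
      show pvWhileA fuel (pvForA cs start e 0 j j cs.length).1 (pvForA cs start e 0 j j cs.length).2.1
          (pvForA cs start e 0 j j cs.length).2.2.1 (pvForA cs start e 0 j j cs.length).2.2.2.2
          (pvForA cs start e 0 j j cs.length).2.2.2.1 cs.length = pvFb cs e j start
      by_cases ha : (pvForA cs start e 0 j j cs.length).2.2.2.1 = 0
      · obtain ⟨hcs, hjlast, _⟩ := c8 ha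
        have hj' : (pvForA cs start e 0 j j cs.length).2.2.2.2 = cs.length - 1 :=
          hjlast hj (by omega)
        have hstop : ∀ f, pvWhileA f (pvForA cs start e 0 j j cs.length).1
            (pvForA cs start e 0 j j cs.length).2.1 (pvForA cs start e 0 j j cs.length).2.2.1
            (pvForA cs start e 0 j j cs.length).2.2.2.2 (pvForA cs start e 0 j j cs.length).2.2.2.1
            cs.length = (pvForA cs start e 0 j j cs.length).1 := by
          intro f
          cases f with
          | zero => rfl
          | succ f =>
            rw [pvWhileA, if_neg]
            rw [ha, hj']
            push_neg
            constructor
            · omega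
            · rfl
        rw [hstop fuel, ← c5]
        exact (pvFb_last _ _ _ _ c3 (by simp only [hcs, hj']; exact le_refl _)).symm
      · rw [ih]
        · exact c5
        · omega
        · exact c3
        · exact c4
        · rcases c9 with hc9 | hc9
          · rw [hc9]; omega
          · omega
        · omega
    · rw [if_neg hc]
      push_neg at hc
      exact (pvFb_last cs e j start hsuf (by omega)).symm

lemma pvGo_append_sent : ∀ (cs : List Char) (ins : Bool),
    pvGo (cs ++ pvSent) ins = pvGo cs ins ++ pvSent := by
  intro cs
  induction cs with
  | nil => intro ins; cases ins <;> rfl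
  | cons c t ih =>
    intro ins
    have h3 : ((c :: t) ++ pvSent).take 3 = pvP3 ↔ (c :: t).take 3 = pvP3 := by
      rcases t with _ | ⟨a, _ | ⟨b, t⟩⟩ <;> simp [pvSent, pvP3]
    have h4 : ((c :: t) ++ pvSent).take 4 = pvP4 ↔ (c :: t).take 4 = pvP4 := by
      rcases t with _ | ⟨a, _ | ⟨b, _ | ⟨d, t⟩⟩⟩ <;> simp [pvSent, pvP4]
    rw [List.cons_append, pvGo, pvGo]
    by_cases hc3 : (c :: t).take 3 = pvP3
    · rw [if_pos (by rw [← List.cons_append]; exact h3.mpr hc3), if_pos hc3, ih]; rfl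
    · rw [if_neg (by rw [← List.cons_append]; exact fun h => hc3 (h3.mp h)), if_neg hc3]
      by_cases hc4 : (c :: t).take 4 = pvP4
      · rw [if_pos (by rw [← List.cons_append]; exact h4.mpr hc4), if_pos hc4, ih]; rfl
      · rw [if_neg (by rw [← List.cons_append]; exact fun h => hc4 (h4.mp h)), if_neg hc4]
        by_cases hc5 : ins = true ∧ c = '\n'
        · rw [if_pos hc5, if_pos hc5, ih]; simp
        · rw [if_neg hc5, if_neg hc5, ih]; rfl

-- ===== VERDICT (by name: the statement is the Claim_ definition above) =====
theorem replaceNextLine_br_spec : Claim_equal_replaceNextLine_br := by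
  intro md _
  unfold Spec_replaceNextLine_br replaceNextLine_br replaceNextLine_br_alt
  dsimp only
  have hsuf : pvSent <:+ (md.toList ++ pvSent) := ⟨md.toList, rfl⟩
  have hlen : (md.toList ++ pvSent).length = md.toList.length + 9 := by simp [pvSent]
  have hA : pvWhileA ((md.toList ++ pvSent).count '\n' + 1) (md.toList ++ pvSent) (-1) (-1) 0 0
      (md.toList ++ pvSent).length = pvFb (md.toList ++ pvSent) (-1) 0 (-1) :=
    pvWhileA_spec _ _ _ _ _ _ _ (le_refl _) hsuf (by omega) (by omega) (by omega)
  rw [hA]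
  have hFb : pvFb (md.toList ++ pvSent) (-1) 0 (-1) = pvGo (md.toList ++ pvSent) false := by
    unfold pvFb
    rw [show pvR (-1) 0 = 0 by rfl]
    norm_num
  rw [hFb, pvGo_append_sent]
  have htk : (pvGo md.toList false ++ pvSent).take ((pvGo md.toList false ++ pvSent).length - 9)
      = pvGo md.toList false := by
    have h9 : (pvGo md.toList false ++ pvSent).length - 9 = (pvGo md.toList false).length := by
      simp [pvSent]
    rw [h9, List.take_left]
  rw [htk, pvBGo_eq md.toList (md.toList.length + 1) 0 false [] (by omega)]
  simp
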